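-- pv_equiv track=rewrite | github.com/DHRUVASAI/loadflow | app.py | _select_server_no_mutate
-- ===== SOURCE A (Python) =====
-- def _is_server_eligible(server: dict) -> bool:
--     status = str(server.get("status", "running")).strip().lower()
--     health = str(server.get("health", "healthy")).strip().lower()
--     return status == "running" and health != "critical"
--
-- def _select_server_no_mutate(servers: list, algo_key: str, session_snapshot: dict) -> dict:
--     """
--     Like _select_server but reads from session_snapshot instead of the real session.
--     Used by /api/compare so live session indexes are not advanced.
--     """
--     eligible = [s for s in servers if _is_server_eligible(s)]
--     if not eligible:
--         eligible = [s for s in servers if str(s.get("status", "running")).strip().lower() == "running"]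
--     if not eligible:
--         raise RuntimeError("No eligible servers")
--
--     eligible_sorted = sorted(eligible, key=lambda s: str(s.get("name") or s.get("id") or ""))
--
--     if algo_key == "round_robin":
--         idx = int(session_snapshot.get("rr_index", 0))
--         return eligible_sorted[idx % len(eligible_sorted)]
--
--     if algo_key == "least_connections":
--         min_conn = min(int(s.get("connections", 0) or 0) for s in eligible_sorted)
--         candidates = [s for s in eligible_sorted if int(s.get("connections", 0) or 0) == min_conn]
--         return candidates[0]
--
--     if algo_key == "weighted":
--         slots: list = []
--         for s in eligible_sorted:
--             w = max(1, min(5, int(s.get("weight", 1) or 1)))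
--             slots.extend([s] * w)
--         idx = int(session_snapshot.get("weighted_index", 0))
--         return slots[idx % len(slots)]
--
--     return eligible_sorted[0]
-- ===== SOURCE B (Python) =====
-- def _select_server_no_mutate(servers: list, algo_key: str, session_snapshot: dict) -> dict:
--     # one classifying pass instead of two filter passes
--     pool, running = [], []
--     for s in servers:
--         if str(s.get("status", "running")).strip().lower() == "running":
--             running.append(s)
--             if str(s.get("health", "healthy")).strip().lower() != "critical":
--                 pool.append(s)
--     if not pool:
--         pool = running
--     if not pool:
--         raise RuntimeError("No eligible servers")
--     pool = sorted(pool, key=lambda s: str(s.get("name") or s.get("id") or ""))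
--
--     if algo_key == "least_connections":
--         return min(pool, key=lambda s: int(s.get("connections", 0) or 0))
--
--     # round_robin, weighted and the default all become one prefix-weight walk
--     if algo_key == "weighted":
--         weights = [max(1, min(5, int(s.get("weight", 1) or 1))) for s in pool]
--         pos = int(session_snapshot.get("weighted_index", 0))
--     elif algo_key == "round_robin":
--         weights = [1] * len(pool)
--         pos = int(session_snapshot.get("rr_index", 0))
--     else:
--         weights = [1] * len(pool)
--         pos = 0
--     pos %= sum(weights)
--     for s, w in zip(pool, weights):
--         if pos < w:
--             return s
--         pos -= w
-- ===== Notes on version B (the rewrite author's own statement) =====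
-- stated objective: alternative
-- what changed: B classifies servers in a single pass into (strictly-eligible, running) lists instead of A's two separate filter passes, replaces least_connections' min-over-values + filter + [0] with one min(..., key=...) pass, and unifies round_robin, weighted and the default branch into a single prefix-weight walk (weights all 1 for round_robin/default, clamped weights for weighted) instead of A's expanded slots list.
import Mathlib
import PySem

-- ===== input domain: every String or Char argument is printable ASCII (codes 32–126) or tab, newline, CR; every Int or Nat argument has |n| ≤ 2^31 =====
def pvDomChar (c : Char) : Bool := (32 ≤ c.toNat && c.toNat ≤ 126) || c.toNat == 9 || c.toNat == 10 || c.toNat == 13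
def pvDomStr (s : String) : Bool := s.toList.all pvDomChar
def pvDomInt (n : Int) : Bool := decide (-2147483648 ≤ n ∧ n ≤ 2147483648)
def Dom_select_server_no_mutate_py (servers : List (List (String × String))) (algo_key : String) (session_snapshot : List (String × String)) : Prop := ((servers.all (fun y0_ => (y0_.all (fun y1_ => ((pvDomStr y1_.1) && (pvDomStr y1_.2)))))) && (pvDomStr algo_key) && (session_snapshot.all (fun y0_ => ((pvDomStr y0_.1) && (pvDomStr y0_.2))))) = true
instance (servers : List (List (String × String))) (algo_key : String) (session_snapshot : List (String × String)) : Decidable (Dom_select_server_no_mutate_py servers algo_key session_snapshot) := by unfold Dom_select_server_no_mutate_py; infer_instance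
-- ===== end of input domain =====

-- B classifies servers in ONE pass into (strictly-eligible, running) instead of A's two
-- filter passes, takes least_connections by a single first-minimum key pass instead of
-- min + filter + [0], and selects round_robin / weighted / default by one unified
-- prefix-weight walk instead of A's expanded slots list.


-- ===== PORT A =====
-- first-match association-list lookup = dict.get(k) under the task's dict convention
def pvLookup (d : List (String × String)) (k : String) : Option String :=
  (d.find? (fun p => p.1 == k)).map (·.2)

-- str(x).strip().lower()
def pvNorm (s : String) : String := PySem.Str.lower (PySem.Str.strip s)

-- str(s.get("status", "running")).strip().lower() == "running"
def pvRunning (s : List (String × String)) : Bool :=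
  pvNorm ((pvLookup s "status").getD "running") == "running"

-- _is_server_eligible
def pvEligibleB (s : List (String × String)) : Bool :=
  pvRunning s && (pvNorm ((pvLookup s "health").getD "healthy") != "critical")

-- 'a or b' chain of str(s.get("name") or s.get("id") or "") : None and "" are falsy
def pvOrS (o : Option String) (d : String) : String :=
  match o with
  | none => d
  | some v => if v = "" then d else v

def pvSortKey (s : List (String × String)) : String :=
  pvOrS (pvLookup s "name") (pvOrS (pvLookup s "id") "")

-- int(s.get(k, d) or d): missing or empty -> d, else int(v) (default d only reached outside Pre_)
def pvIntField (o : Option String) (d : Int) : Int :=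
  match o with
  | none => d
  | some v => if v = "" then d else (PySem.Int.ofStr? v).getD d

-- int(session_snapshot.get(k, 0)): missing -> 0, else int(v) (default 0 only reached outside Pre_)
def pvIntSnap (o : Option String) : Int :=
  match o with
  | none => 0
  | some v => (PySem.Int.ofStr? v).getD 0

def pvConn (s : List (String × String)) : Int := pvIntField (pvLookup s "connections") 0

def pvClamp (s : List (String × String)) : Int :=
  max 1 (min 5 (pvIntField (pvLookup s "weight") 1))

-- eligible / fallback / sorted(eligible, key=...)
def pvEligibleSorted (servers : List (List (String × String))) : List (List (String × String)) :=
  let eligible := servers.filter pvEligibleB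
  let eligible := if eligible.isEmpty then servers.filter pvRunning else eligible
  PySem.List.sorted eligible pvSortKey

def select_server_no_mutate_py (servers : List (List (String × String))) (algo_key : String) (session_snapshot : List (String × String)) : List (String × String) :=
  let es := pvEligibleSorted servers
  if algo_key = "round_robin" then
    let idx := pvIntSnap (pvLookup session_snapshot "rr_index")
    (PySem.List.pyGet? es (PySem.Int.mod idx es.length)).getD []
  else if algo_key = "least_connections" then
    let minConn := (PySem.List.min? (es.map pvConn) (fun v => v)).getD 0
    (((es.filter (fun s => pvConn s == minConn)).head?).getD [])
  else if algo_key = "weighted" then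
    let slots := es.foldl (fun acc s => acc ++ List.replicate (pvClamp s).toNat s) []
    let idx := pvIntSnap (pvLookup session_snapshot "weighted_index")
    (PySem.List.pyGet? slots (PySem.Int.mod idx slots.length)).getD []
  else (es.head?).getD []

-- ===== PORT B =====
-- m.get(k): first-match lookup written with List.lookup
def bGet (m : List (String × String)) (k : String) : Option String := m.lookup k

-- str(x).strip().lower() appears verbatim in both Pythons; B reuses pvNorm
def bStatusRunning (s : List (String × String)) : Bool :=
  pvNorm ((bGet s "status").getD "running") == "running"

def bHealthOk (s : List (String × String)) : Bool :=
  pvNorm ((bGet s "health").getD "healthy") != "critical"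

-- single classifying pass: (strictly eligible servers, running servers), in input order
def bClassify (servers : List (List (String × String))) :
    List (List (String × String)) × List (List (String × String)) :=
  servers.foldl
    (fun acc s =>
      if bStatusRunning s then
        if bHealthOk s then (acc.1 ++ [s], acc.2 ++ [s]) else (acc.1, acc.2 ++ [s])
      else acc)
    ([], [])

-- 'x or y' for the falsy shapes occurring here (missing key / empty string)
def bFirstTruthy (o : Option String) (d : String) : String :=
  match o with
  | some v => if v = "" then d else v
  | none => d

def bKey (s : List (String × String)) : String :=
  bFirstTruthy (bGet s "name") (bFirstTruthy (bGet s "id") "")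

-- int(m.get(k, dflt) or dflt) with int default dflt
def bIntOr (m : List (String × String)) (k : String) (dflt : Int) : Int :=
  ((bGet m k).bind (fun v => if v = "" then none else PySem.Int.ofStr? v)).getD dflt

-- int(session_snapshot.get(k, 0))
def bSnap (m : List (String × String)) (k : String) : Int :=
  ((bGet m k).bind PySem.Int.ofStr?).getD 0

-- for s, w in zip(pool, weights): if pos < w: return s; pos -= w
def bWalk : List (List (String × String)) → List Int → Int → List (String × String)
  | s :: ss, w :: ws, pos => if pos < w then s else bWalk ss ws (pos - w)
  | _, _, _ => []

def select_server_no_mutate_py_alt (servers : List (List (String × String))) (algo_key : String) (session_snapshot : List (String × String)) : List (String × String) :=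
  let cls := bClassify servers
  let pool0 := if cls.1.isEmpty then cls.2 else cls.1
  let pool := PySem.List.sorted pool0 bKey
  if algo_key = "least_connections" then
    (PySem.List.min? pool (fun s => bIntOr s "connections" 0)).getD []
  else
    let wp :=
      if algo_key = "weighted" then
        (pool.map (fun s => max 1 (min 5 (bIntOr s "weight" 1))),
         bSnap session_snapshot "weighted_index")
      else if algo_key = "round_robin" then
        (List.replicate pool.length 1, bSnap session_snapshot "rr_index")
      else
        (List.replicate pool.length 1, 0)
    bWalk pool wp.1 (PySem.Int.mod wp.2 wp.1.sum)

-- ===== PRECONDITION & SPEC =====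
-- Pre_ holds exactly where Python A returns normally: some server has status "running"
-- (else RuntimeError), and every int(...) the chosen branch performs succeeds (else ValueError):
-- the snapshot index of the branch parses, and the connections/weight value of every server that
-- can end up in the selection list is missing, empty, or a valid int literal.
def pvKeyOk (snap : List (String × String)) (k : String) : Prop :=
  ((pvLookup snap k).all (fun v => (PySem.Int.ofStr? v).isSome)) = true

def pvFieldOk (s : List (String × String)) (k : String) : Prop :=
  ((pvLookup s k).all (fun v => v == "" || (PySem.Int.ofStr? v).isSome)) = true

-- s is in the list the selection works on (strictly eligible if any exists, else running)
def pvUsed (servers : List (List (String × String))) (s : List (String × String)) : Prop :=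
  (if servers.any pvEligibleB then pvEligibleB s else pvRunning s) = true

def Pre_select_server_no_mutate_py (servers : List (List (String × String))) (algo_key : String) (session_snapshot : List (String × String)) : Prop :=
  (∃ s ∈ servers, pvRunning s = true)
  ∧ (algo_key = "round_robin" → pvKeyOk session_snapshot "rr_index")
  ∧ (algo_key = "weighted" → pvKeyOk session_snapshot "weighted_index"
       ∧ ∀ s ∈ servers, pvUsed servers s → pvFieldOk s "weight")
  ∧ (algo_key = "least_connections" → ∀ s ∈ servers, pvUsed servers s → pvFieldOk s "connections")

instance (servers : List (List (String × String))) (algo_key : String) (session_snapshot : List (String × String)) : Decidable (Pre_select_server_no_mutate_py servers algo_key session_snapshot) := by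
  unfold Pre_select_server_no_mutate_py pvKeyOk pvFieldOk pvUsed; infer_instance

def pvWitness_select_server_no_mutate_py : (List (List (String × String))) × String × (List (String × String)) :=
  ([[("name", "a"), ("weight", "3")], [("name", "b")]], "weighted", [("weighted_index", "4")])

def Spec_select_server_no_mutate_py (servers : List (List (String × String))) (algo_key : String) (session_snapshot : List (String × String)) (out : List (String × String)) : Prop := out = select_server_no_mutate_py_alt servers algo_key session_snapshot
instance (servers : List (List (String × String))) (algo_key : String) (session_snapshot : List (String × String)) (out : List (String × String)) : Decidable (Spec_select_server_no_mutate_py servers algo_key session_snapshot out) := by unfold Spec_select_server_no_mutate_py; infer_instance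

-- ===== CLAIM (what is proved, stated in full; the proofs are below) =====
def Claim_equal_select_server_no_mutate_py : Prop := ∀ (servers : List (List (String × String))) (algo_key : String) (session_snapshot : List (String × String)), Dom_select_server_no_mutate_py servers algo_key session_snapshot → Pre_select_server_no_mutate_py servers algo_key session_snapshot → Spec_select_server_no_mutate_py servers algo_key session_snapshot (select_server_no_mutate_py servers algo_key session_snapshot)

-- ===== LEMMAS AND PROOFS =====

-- B's primitive helpers compute the same functions as A's (the Python idioms are the same)
theorem bGet_eq : bGet = pvLookup := by
  funext m k
  induction m with
  | nil => rfl
  | cons p t ih =>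
      cases p with
      | mk a b =>
          simp only [bGet, List.lookup, pvLookup, List.find?] at *
          by_cases h : k = a
          · subst h; simp
          · have h1 : (k == a) = false := by simpa using h
            have h2 : (a == k) = false := by simpa using (Ne.symm h)
            simp [h1, h2, ih]

theorem bStatusRunning_eq : bStatusRunning = pvRunning := by
  funext s; simp [bStatusRunning, pvRunning, bGet_eq, pvNorm]

theorem bElig_eq (s : List (String × String)) :
    (bStatusRunning s && bHealthOk s) = pvEligibleB s := by
  simp [bStatusRunning, bHealthOk, pvEligibleB, pvRunning, bGet_eq, pvNorm]

theorem bKey_eq : bKey = pvSortKey := by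
  funext s
  simp only [bKey, pvSortKey, bGet_eq]
  cases pvLookup s "name" with
  | none =>
      cases pvLookup s "id" with
      | none => rfl
      | some w => by_cases hw : w = "" <;> simp [bFirstTruthy, pvOrS, hw]
  | some v =>
      cases pvLookup s "id" with
      | none => by_cases hv : v = "" <;> simp [bFirstTruthy, pvOrS, hv]
      | some w =>
          by_cases hv : v = "" <;> by_cases hw : w = "" <;>
            simp [bFirstTruthy, pvOrS, hv, hw]

theorem bConn_eq (s : List (String × String)) : bIntOr s "connections" 0 = pvConn s := by
  simp only [bIntOr, pvConn, pvIntField, bGet_eq]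
  cases pvLookup s "connections" with
  | none => rfl
  | some v =>
      by_cases hv : v = ""
      · simp [hv]
      · simp only [hv, if_neg hv, Option.bind_some]
        cases PySem.Int.ofStr? v <;> rfl

theorem bWeight_eq (s : List (String × String)) :
    max 1 (min 5 (bIntOr s "weight" 1)) = pvClamp s := by
  simp only [bIntOr, pvClamp, pvIntField, bGet_eq]
  cases pvLookup s "weight" with
  | none => rfl
  | some v =>
      by_cases hv : v = ""
      · simp [hv]
      · simp only [hv, if_neg hv, Option.bind_some]
        cases PySem.Int.ofStr? v <;> rfl

theorem bSnap_eq (m : List (String × String)) (k : String) :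
    bSnap m k = pvIntSnap (pvLookup m k) := by
  simp only [bSnap, pvIntSnap, bGet_eq]
  cases pvLookup m k with
  | none => rfl
  | some v => cases PySem.Int.ofStr? v <;> rfl

-- the single classifying pass produces exactly A's two filtered lists
theorem bClassify_go (servers : List (List (String × String)))
    (p r : List (List (String × String))) :
    servers.foldl
      (fun acc s =>
        if bStatusRunning s then
          if bHealthOk s then (acc.1 ++ [s], acc.2 ++ [s]) else (acc.1, acc.2 ++ [s])
        else acc)
      (p, r)
    = (p ++ servers.filter pvEligibleB, r ++ servers.filter pvRunning) := by
  induction servers generalizing p r with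
  | nil => simp
  | cons s t ih =>
      have he : pvEligibleB s = (bStatusRunning s && bHealthOk s) := (bElig_eq s).symm
      have hr : pvRunning s = bStatusRunning s := by rw [bStatusRunning_eq]
      simp only [List.foldl_cons, List.filter_cons, he, hr]
      by_cases h1 : bStatusRunning s
      · by_cases h2 : bHealthOk s
        · simp [h1, h2, ih, List.append_assoc]
        · simp [h1, h2, ih, List.append_assoc]
      · simp [h1, ih]

theorem bClassify_eq (servers : List (List (String × String))) :
    bClassify servers = (servers.filter pvEligibleB, servers.filter pvRunning) := by
  simpa using bClassify_go servers [] []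

-- B's sorted pool is A's eligible_sorted
theorem bPool_eq (servers : List (List (String × String))) :
    PySem.List.sorted
      (if (bClassify servers).1.isEmpty then (bClassify servers).2 else (bClassify servers).1)
      bKey
    = pvEligibleSorted servers := by
  rw [bClassify_eq, bKey_eq]
  simp [pvEligibleSorted]

-- ---- least_connections: A's min-value + filter + [0]  =  B's first key-minimum ----
-- running minimum with seed x over t (the state of Python's min(...) after its first step)
def pvMinD (c : List (String × String) → Int) (x : List (String × String)) (t : List (List (String × String))) : List (String × String) :=
  t.foldl (fun m y => if c y < c m then y else m) x

def pvStep (c : List (String × String) → Int) (acc : Option (List (String × String))) (y : List (String × String)) : Option (List (String × String)) :=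
  match acc with
  | none => some y
  | some m => if c y < c m then some y else some m

def pvStepI (acc : Option Int) (v : Int) : Option Int :=
  match acc with
  | none => some v
  | some m => if v < m then some v else some m

theorem pvMin?_eq_foldl (c : List (String × String) → Int) (es : List (List (String × String))) :
    PySem.List.min? es c = es.foldl (pvStep c) none := by
  unfold PySem.List.min?
  congr 1
  funext acc y; cases acc <;> rfl

theorem pvMin?_id_eq_foldl (vs : List Int) :
    PySem.List.min? vs (fun v => v) = vs.foldl pvStepI none := by
  unfold PySem.List.min?
  congr 1
  funext acc v; cases acc <;> rfl

theorem pvMin?_from_some (c : List (String × String) → Int) (t : List (List (String × String))) (x : List (String × String)) :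
    t.foldl (pvStep c) (some x) = some (pvMinD c x t) := by
  induction t generalizing x with
  | nil => rfl
  | cons y t ih =>
      simp only [List.foldl_cons, pvMinD]
      by_cases h : c y < c x <;> simp [pvStep, h, ih, pvMinD]

theorem pvMin?_cons (c : List (String × String) → Int) (x : List (String × String)) (t : List (List (String × String))) :
    PySem.List.min? (x :: t) c = some (pvMinD c x t) := by
  rw [pvMin?_eq_foldl, List.foldl_cons]
  exact pvMin?_from_some c t x

theorem pvStepI_map (c : List (String × String) → Int) (acc : Option (List (String × String))) (y : List (String × String)) :
    pvStepI (acc.map c) (c y) = (pvStep c acc y).map c := by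
  cases acc with
  | none => rfl
  | some m => by_cases h : c y < c m <;> simp [pvStepI, pvStep, h]

theorem pvMin?_map_aux (c : List (String × String) → Int) (t : List (List (String × String))) (acc : Option (List (String × String))) :
    (t.map c).foldl pvStepI (acc.map c) = (t.foldl (pvStep c) acc).map c := by
  induction t generalizing acc with
  | nil => rfl
  | cons y t ih =>
      simp only [List.map_cons, List.foldl_cons, pvStepI_map]
      exact ih _

theorem pvMin?_map (c : List (String × String) → Int) (es : List (List (String × String))) :
    PySem.List.min? (es.map c) (fun v => v) = (PySem.List.min? es c).map c := by
  rw [pvMin?_eq_foldl, pvMin?_id_eq_foldl]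
  simpa using pvMin?_map_aux c es none

theorem pvMinD_le (c : List (String × String) → Int) (t : List (List (String × String))) (x : List (String × String)) :
    c (pvMinD c x t) ≤ c x := by
  induction t generalizing x with
  | nil => simp [pvMinD]
  | cons y t ih =>
      simp only [pvMinD, List.foldl_cons]
      by_cases h : c y < c x
      · simp only [if_pos h]; exact le_trans (ih y) (le_of_lt h)
      · simp only [if_neg h]; exact ih x

theorem pvMinD_filter_head (c : List (String × String) → Int) (t : List (List (String × String))) (x : List (String × String)) :
    ((x :: t).filter (fun s => c s == c (pvMinD c x t))).head? = some (pvMinD c x t) := by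
  induction t generalizing x with
  | nil => simp [pvMinD]
  | cons y t ih =>
      have hstep : pvMinD c x (y :: t) = pvMinD c (if c y < c x then y else x) t := by
        simp [pvMinD]
      by_cases h : c y < c x
      · -- x cannot achieve the minimum
        rw [hstep, if_pos h]
        have hm := pvMinD_le c t y
        have hx : ¬ (c x == c (pvMinD c y t)) := by
          simp only [beq_iff_eq]; omega
        have := ih y
        simpa [List.filter_cons, hx] using this
      · rw [hstep, if_neg h]
        have hxy : c x ≤ c y := not_lt.mp h
        have hm := pvMinD_le c t x
        have hIH := ih x
        by_cases hx : c x = c (pvMinD c x t)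
        · -- then x itself is the head of both filters, and the IH forces pvMinD = x
          have hxf : (x :: t).filter (fun s => c s == c (pvMinD c x t)) = x :: (t.filter (fun s => c s == c (pvMinD c x t))) := by
            simp [hx]
          rw [hxf] at hIH
          have hmx : pvMinD c x t = x := by
            have := hIH
            simp only [List.head?_cons, Option.some_inj] at this
            exact this.symm
          by_cases hy : c y = c (pvMinD c x t)
          · simp [hx, hy, hmx]
          · simp [hx, hy, hmx]
        · -- x drops out of both filters
          have hy : ¬ (c y == c (pvMinD c x t)) := by
            simp only [beq_iff_eq]; omega
          have hxb : ¬ (c x == c (pvMinD c x t)) := by simp [beq_iff_eq, hx]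
          have hIH' : (t.filter (fun s => c s == c (pvMinD c x t))).head? = some (pvMinD c x t) := by
            simpa [List.filter_cons, hxb] using hIH
          simpa [List.filter_cons, hxb, hy] using hIH'

theorem pvLeast_eq (es : List (List (String × String))) :
    (((es.filter (fun s => pvConn s == (PySem.List.min? (es.map pvConn) (fun v => v)).getD 0)).head?).getD [])
    = (PySem.List.min? es pvConn).getD [] := by
  cases es with
  | nil => simp [PySem.List.min?]
  | cons x t =>
      rw [pvMin?_map, pvMin?_cons]
      simpa using congrArg (fun o => o.getD ([] : List (String × String)))
        (pvMinD_filter_head pvConn t x)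

-- ---- the prefix-weight walk ----
def pvF (s : List (String × String)) : List (List (String × String)) :=
  List.replicate (pvClamp s).toNat s

theorem pvSlots_eq_flatMap (es : List (List (String × String))) (init : List (List (String × String))) :
    es.foldl (fun acc s => acc ++ List.replicate (pvClamp s).toNat s) init = init ++ es.flatMap pvF := by
  induction es generalizing init with
  | nil => simp
  | cons s t ih => simp [List.foldl_cons, ih, pvF, List.flatMap_cons, List.append_assoc]

theorem pvClamp_pos (s : List (String × String)) : 1 ≤ pvClamp s := by
  simp [pvClamp]

theorem pvSlots_len (es : List (List (String × String))) :
    ((es.flatMap pvF).length : Int) = (es.map pvClamp).sum := by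
  induction es with
  | nil => simp
  | cons s t ih =>
      have h1 : 1 ≤ pvClamp s := pvClamp_pos s
      simp only [List.flatMap_cons, List.length_append, pvF, List.length_replicate,
        List.map_cons, List.sum_cons]
      push_cast
      rw [Int.toNat_of_nonneg (by omega)]
      omega

-- the walk over clamped weights reads the expanded slots list
theorem bWalk_slots (es : List (List (String × String))) (pos : Int)
    (h0 : 0 ≤ pos) (hlt : pos < ((es.flatMap pvF).length : Int)) :
    bWalk es (es.map pvClamp) pos
      = (PySem.List.pyGet? (es.flatMap pvF) pos).getD [] := by
  induction es generalizing pos with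
  | nil => simp at hlt; omega
  | cons s t ih =>
      have h1 : 1 ≤ pvClamp s := pvClamp_pos s
      have hw : ((pvClamp s).toNat : Int) = pvClamp s := Int.toNat_of_nonneg (by omega)
      simp only [List.map_cons, bWalk]
      rw [PySem.List.pyGet?_of_nonneg _ h0]
      simp only [List.flatMap_cons]
      by_cases hc : pos < pvClamp s
      · rw [if_pos hc]
        have hlt' : pos.toNat < (pvClamp s).toNat := by omega
        rw [List.getElem?_append_left (by simpa [pvF] using hlt')]
        simp [pvF, hlt']
      · rw [if_neg hc]
        have hge : (pvClamp s).toNat ≤ pos.toNat := by omega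
        have hlen : (pvF s).length = (pvClamp s).toNat := by simp [pvF]
        rw [List.getElem?_append_right (by omega)]
        have h0' : 0 ≤ pos - pvClamp s := by omega
        have hlt2 : pos - pvClamp s < ((t.flatMap pvF).length : Int) := by
          have := hlt
          simp only [List.flatMap_cons, List.length_append, hlen] at this
          push_cast at this ⊢
          omega
        have := ih (pos - pvClamp s) h0' hlt2
        rw [PySem.List.pyGet?_of_nonneg _ h0'] at this
        have hnat : pos.toNat - (pvF s).length = (pos - pvClamp s).toNat := by
          rw [hlen]; omega
        rw [hnat, this]

theorem pvWeighted_eq (es : List (List (String × String))) (idx : Int) :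
    (PySem.List.pyGet? (es.foldl (fun acc s => acc ++ List.replicate (pvClamp s).toNat s) [])
        (PySem.Int.mod idx (es.foldl (fun acc s => acc ++ List.replicate (pvClamp s).toNat s) []).length)).getD []
    = bWalk es (es.map pvClamp) (PySem.Int.mod idx (es.map pvClamp).sum) := by
  rw [pvSlots_eq_flatMap, List.nil_append]
  cases es with
  | nil => simp [bWalk, PySem.List.pyGet?]
  | cons s t =>
      have hlen := pvSlots_len (s :: t)
      have hpos : (0 : Int) < (((s :: t).flatMap pvF).length : Int) := by
        have h1 : 1 ≤ pvClamp s := pvClamp_pos s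
        have : 1 ≤ (pvF s).length := by
          simp [pvF]; omega
        simp only [List.flatMap_cons, List.length_append]
        push_cast
        omega
      rw [← hlen]
      exact (bWalk_slots (s :: t) _ (PySem.Int.mod_nonneg _ hpos) (PySem.Int.mod_lt _ hpos)).symm

-- the walk over all-1 weights is plain indexing
theorem bWalk_ones (es : List (List (String × String))) (pos : Int)
    (h0 : 0 ≤ pos) (hlt : pos < (es.length : Int)) :
    bWalk es (List.replicate es.length 1) pos = (PySem.List.pyGet? es pos).getD [] := by
  induction es generalizing pos with
  | nil => simp at hlt; omega
  | cons s t ih =>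
      simp only [List.length_cons, List.replicate_succ, bWalk]
      by_cases hc : pos < 1
      · have hp : pos = 0 := by omega
        subst hp
        simp [hc, PySem.List.pyGet?_zero_cons]
      · rw [if_neg hc]
        have h0' : 0 ≤ pos - 1 := by omega
        have hlt' : pos - 1 < (t.length : Int) := by
          simp only [List.length_cons] at hlt; push_cast at hlt ⊢; omega
        rw [ih (pos - 1) h0' hlt']
        rw [PySem.List.pyGet?_of_nonneg _ h0, PySem.List.pyGet?_of_nonneg _ h0']
        have hnat : pos.toNat = (pos - 1).toNat + 1 := by omega
        rw [hnat]
        simp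

theorem pvRR_eq (es : List (List (String × String))) (idx : Int) (hne : es ≠ []) :
    (PySem.List.pyGet? es (PySem.Int.mod idx es.length)).getD []
    = bWalk es (List.replicate es.length 1) (PySem.Int.mod idx (List.replicate es.length (1 : Int)).sum) := by
  have hsum : (List.replicate es.length (1 : Int)).sum = (es.length : Int) := by
    simp [List.sum_replicate, mul_comm]
  have hpos : (0 : Int) < (es.length : Int) := by
    have := List.length_pos_iff.mpr hne
    exact_mod_cast this
  rw [hsum]
  exact (bWalk_ones es _ (PySem.Int.mod_nonneg _ hpos) (PySem.Int.mod_lt _ hpos)).symm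

theorem pvDefault_eq (es : List (List (String × String))) (hne : es ≠ []) :
    (es.head?).getD []
    = bWalk es (List.replicate es.length 1) (PySem.Int.mod 0 (List.replicate es.length (1 : Int)).sum) := by
  cases es with
  | nil => exact absurd rfl hne
  | cons s t =>
      have hpos : (0 : Int) < ((s :: t).length : Int) := by
        have : 0 < (s :: t).length := Nat.succ_pos _
        exact_mod_cast this
      have hsum : (List.replicate (s :: t).length (1 : Int)).sum = ((s :: t).length : Int) := by
        simp [List.sum_replicate]
      have hm : PySem.Int.mod 0 ((s :: t).length : Int) = 0 := by
        rw [PySem.Int.mod_eq_emod_of_pos hpos]; simp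
      rw [hsum, hm]
      simp [bWalk, List.replicate_succ]

-- the pool is nonempty whenever some server is running
theorem pvES_ne (servers : List (List (String × String)))
    (h : ∃ s ∈ servers, pvRunning s = true) : pvEligibleSorted servers ≠ [] := by
  obtain ⟨s, hs, hr⟩ := h
  unfold pvEligibleSorted
  intro hc
  rw [PySem.List.sorted_eq_nil_iff] at hc
  by_cases he : (servers.filter pvEligibleB).isEmpty
  · rw [if_pos he] at hc
    have : s ∈ servers.filter pvRunning := List.mem_filter.mpr ⟨hs, hr⟩
    rw [hc] at this; simp at this
  · rw [if_neg he] at hc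
    simp [hc] at he

-- ===== VERDICT (by name: the statement is the Claim_ definition above) =====
theorem select_server_no_mutate_py_spec : Claim_equal_select_server_no_mutate_py := by
  intro servers algo_key session_snapshot _hdom hpre
  unfold Spec_select_server_no_mutate_py
  unfold select_server_no_mutate_py select_server_no_mutate_py_alt
  have hne : pvEligibleSorted servers ≠ [] := pvES_ne servers hpre.1
  simp only [bPool_eq]
  have hconn : (fun s => bIntOr s "connections" 0) = pvConn := funext bConn_eq
  have hwt : (fun s => max 1 (min 5 (bIntOr s "weight" 1))) = pvClamp := funext bWeight_eq
  by_cases h1 : algo_key = "round_robin"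
  · have h1' : algo_key ≠ "least_connections" := by rw [h1]; decide
    have h1'' : algo_key ≠ "weighted" := by rw [h1]; decide
    simp only [if_pos h1, if_neg h1', if_neg h1'', bSnap_eq]
    exact pvRR_eq (pvEligibleSorted servers) _ hne
  · rw [if_neg h1]
    by_cases h2 : algo_key = "least_connections"
    · rw [if_pos h2, if_pos h2, hconn]
      exact pvLeast_eq (pvEligibleSorted servers)
    · rw [if_neg h2, if_neg h2]
      by_cases h3 : algo_key = "weighted"
      · simp only [if_pos h3, hwt, bSnap_eq]
        exact pvWeighted_eq (pvEligibleSorted servers) _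
      · simp only [if_neg h3, if_neg h1]
        exact pvDefault_eq (pvEligibleSorted servers) hne
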